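-- pv_equiv track=rewrite | github.com/daandtu/AutoMartini | auto_martiniM3/topology.py | get_mass
-- ===== SOURCE A (Python) =====
-- def get_mass(smi): # AutoM3
--     """Gets real mass of atoms in smile code"""
--     smi_mass=0
--     atom_mass={"C":12,"O":16,"N":14,"S":32,"Cl":35,"I":127,"F":19,"Br":80,"P":31,"Si":28,"B":11,"Be":9,"Li":1,"Mg":24,"Ca":40,"K":39}
--     i = 0
--     while i < len(smi):
--         if i < len(smi)-1 and smi[i:i+2] in atom_mass:  # Check if the current two characters form a known atom
--             smi_mass += atom_mass[smi[i:i+2]]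
--             i += 2
--         elif smi[i] in atom_mass:  # Check if the current character forms a known atom
--             smi_mass += atom_mass[smi[i]]
--             i += 1
--         else:  # Skip unknown characters
--             i += 1
--     return smi_mass
-- ===== SOURCE B (Python) =====
-- TWO = {"Cl": 35, "Br": 80, "Si": 28, "Be": 9, "Li": 1, "Mg": 24, "Ca": 40}
-- ONE = {"C": 12, "O": 16, "N": 14, "S": 32, "I": 127, "F": 19, "P": 31, "B": 11, "K": 39}
--
--
-- def get_mass(smi):
--     """Gets real mass of atoms in smile code (stack-pop tokenizer)."""
--     stack = list(smi)
--     stack.reverse()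
--     total = 0
--     while stack:
--         c = stack.pop()
--         if stack and c + stack[-1] in TWO:
--             total += TWO[c + stack.pop()]
--         else:
--             total += ONE.get(c, 0)
--     return total
-- ===== Notes on version B (the rewrite author's own statement) =====
-- stated objective: alternative
-- what changed: A's index-arithmetic while loop over one mixed 1-and-2-letter dict is replaced by a stack-pop tokenizer over the reversed character list with separate two-letter and one-letter mass tables and a defaulting lookup instead of membership-test-then-index.
import Mathlib
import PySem

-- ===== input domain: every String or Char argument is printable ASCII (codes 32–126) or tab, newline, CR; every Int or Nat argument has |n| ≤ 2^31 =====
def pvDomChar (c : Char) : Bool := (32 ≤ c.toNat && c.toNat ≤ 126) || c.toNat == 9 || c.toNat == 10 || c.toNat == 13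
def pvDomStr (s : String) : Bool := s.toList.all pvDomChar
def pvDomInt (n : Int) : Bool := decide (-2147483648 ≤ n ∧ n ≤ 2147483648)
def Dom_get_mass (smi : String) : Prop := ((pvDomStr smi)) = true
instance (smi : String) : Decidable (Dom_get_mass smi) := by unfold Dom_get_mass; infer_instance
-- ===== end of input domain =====

-- B replaces A's index-based while loop over one mixed dict by a recursive tokenizer
-- over the character list with separate two-letter/one-letter tables (alternative decomposition).

-- ===== PORT A =====
-- the dict literal of A, in insertion order
def atomMassA : List (String × Int) :=
  [("C",12),("O",16),("N",14),("S",32),("Cl",35),("I",127),("F",19),("Br",80),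
   ("P",31),("Si",28),("B",11),("Be",9),("Li",1),("Mg",24),("Ca",40),("K",39)]

-- the while loop: state (i, smi_mass); smi[i:i+2] = take 2 of drop i, smi[i] = take 1 of drop i
def getMassLoopA (cs : List Char) (i : Nat) (acc : Int) : Int :=
  if _h : i < cs.length then
    if i < cs.length - 1 ∧ (atomMassA.lookup (String.ofList ((cs.drop i).take 2))).isSome then
      getMassLoopA cs (i + 2) (acc + (atomMassA.lookup (String.ofList ((cs.drop i).take 2))).getD 0)
    else if (atomMassA.lookup (String.ofList ((cs.drop i).take 1))).isSome then
      getMassLoopA cs (i + 1) (acc + (atomMassA.lookup (String.ofList ((cs.drop i).take 1))).getD 0)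
    else
      getMassLoopA cs (i + 1) acc
  else acc
termination_by cs.length - i

def get_mass (smi : String) : Int := getMassLoopA smi.toList 0 0

-- ===== PORT B =====
def twoMassB : List (String × Int) :=
  [("Cl",35),("Br",80),("Si",28),("Be",9),("Li",1),("Mg",24),("Ca",40)]

def oneMassB : List (String × Int) :=
  [("C",12),("O",16),("N",14),("S",32),("I",127),("F",19),("P",31),("B",11),("K",39)]

-- Source B's while loop over the reversed char stack; the Python stack's top (its last
-- element, what pop() returns next) is the HEAD of this list, so stack = smi.toList.
-- State: (stack, total); pop = take the head; 'stack and …' = the tail is non-empty.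
def getMassGoB (stack : List Char) (total : Int) : Int :=
  match stack with
  | [] => total
  | [c] => getMassGoB [] (total + (oneMassB.lookup (String.ofList [c])).getD 0)
  | c :: c2 :: rest =>
    match twoMassB.lookup (String.ofList [c, c2]) with
    | some m => getMassGoB rest (total + m)
    | none => getMassGoB (c2 :: rest) (total + (oneMassB.lookup (String.ofList [c])).getD 0)

def get_mass_alt (smi : String) : Int := getMassGoB smi.toList 0

-- ===== PRECONDITION & SPEC =====
def Spec_get_mass (smi : String) (out : Int) : Prop := out = get_mass_alt smi
instance (smi : String) (out : Int) : Decidable (Spec_get_mass smi out) := by unfold Spec_get_mass; infer_instance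

-- ===== CLAIM (what is proved, stated in full; the proofs are below) =====
def Claim_equal_get_mass : Prop := ∀ (smi : String), Dom_get_mass smi → Spec_get_mass smi (get_mass smi)

-- ===== LEMMAS AND PROOFS =====

@[simp] theorem beq_ne_of_len (l : List Char) (s : String) (h : l.length ≠ s.toList.length) :
    (String.ofList l == s) = false := by
  apply beq_false_of_ne
  intro he
  apply h
  rw [← he]
  simp

-- looking up a single-character key in A's mixed dict sees only the one-letter entries
theorem lookup_one (c : Char) :
    atomMassA.lookup (String.ofList [c]) = oneMassB.lookup (String.ofList [c]) := by
  simp [atomMassA, oneMassB, List.lookup]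

-- looking up a two-character key in A's mixed dict sees only the two-letter entries
theorem lookup_two (a b : Char) :
    atomMassA.lookup (String.ofList [a, b]) = twoMassB.lookup (String.ofList [a, b]) := by
  simp [atomMassA, twoMassB, List.lookup]

theorem goB_nil (t : Int) : getMassGoB [] t = t := rfl

theorem goB_single (c : Char) (t : Int) :
    getMassGoB [c] t = getMassGoB [] (t + (oneMassB.lookup (String.ofList [c])).getD 0) := rfl

theorem goB_two (c c2 : Char) (rest : List Char) (t m : Int)
    (h : twoMassB.lookup (String.ofList [c, c2]) = some m) :
    getMassGoB (c :: c2 :: rest) t = getMassGoB rest (t + m) := by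
  simp [getMassGoB, h]

theorem goB_skip2 (c c2 : Char) (rest : List Char) (t : Int)
    (h : twoMassB.lookup (String.ofList [c, c2]) = none) :
    getMassGoB (c :: c2 :: rest) t
      = getMassGoB (c2 :: rest) (t + (oneMassB.lookup (String.ofList [c])).getD 0) := by
  simp [getMassGoB, h]

theorem loop_eq_go (cs : List Char) (i : Nat) (acc : Int) :
    getMassLoopA cs i acc = getMassGoB (cs.drop i) acc := by
  fun_induction getMassLoopA cs i acc with
  | case1 i acc h hc ih =>
    obtain ⟨h1, h2⟩ := hc
    have hi1 : i + 1 < cs.length := by omega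
    have hd : cs.drop i = cs[i] :: cs[i+1] :: cs.drop (i + 2) := by
      rw [List.drop_eq_getElem_cons h, List.drop_eq_getElem_cons hi1]
    have ht : (cs.drop i).take 2 = [cs[i], cs[i+1]] := by rw [hd]; rfl
    rw [ht, lookup_two] at h2
    obtain ⟨m, hm⟩ := Option.isSome_iff_exists.mp h2
    rw [ih, ht, lookup_two, hm, Option.getD_some, hd, goB_two _ _ _ _ _ hm]
  | case2 i acc h hc hs ih =>
    have hd1 : cs.drop i = cs[i] :: cs.drop (i + 1) := List.drop_eq_getElem_cons h
    have ht1 : (cs.drop i).take 1 = [cs[i]] := by rw [hd1]; rfl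
    rw [ht1, lookup_one] at hs
    obtain ⟨m, hm⟩ := Option.isSome_iff_exists.mp hs
    rw [ih, ht1, lookup_one, hm, Option.getD_some]
    by_cases hlen : i + 1 < cs.length
    · have hd2 : cs.drop (i + 1) = cs[i+1] :: cs.drop (i + 2) := List.drop_eq_getElem_cons hlen
      have ht2 : (cs.drop i).take 2 = [cs[i], cs[i+1]] := by rw [hd1, hd2]; rfl
      have h2none : twoMassB.lookup (String.ofList [cs[i], cs[i+1]]) = none := by
        apply Option.not_isSome_iff_eq_none.mp
        intro hcon
        exact hc ⟨by omega, by rw [ht2, lookup_two]; exact hcon⟩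
      rw [hd1, hd2, goB_skip2 _ _ _ _ h2none, hm, Option.getD_some, ← hd2]
    · have hnil : cs.drop (i + 1) = [] := List.drop_eq_nil_of_le (by omega)
      rw [hnil, hd1, hnil, goB_single, hm, Option.getD_some]
  | case3 i acc h hc hns ih =>
    have hd1 : cs.drop i = cs[i] :: cs.drop (i + 1) := List.drop_eq_getElem_cons h
    have ht1 : (cs.drop i).take 1 = [cs[i]] := by rw [hd1]; rfl
    rw [ht1, lookup_one] at hns
    have h1none : oneMassB.lookup (String.ofList [cs[i]]) = none :=
      Option.not_isSome_iff_eq_none.mp (by simpa using hns)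
    rw [ih]
    by_cases hlen : i + 1 < cs.length
    · have hd2 : cs.drop (i + 1) = cs[i+1] :: cs.drop (i + 2) := List.drop_eq_getElem_cons hlen
      have ht2 : (cs.drop i).take 2 = [cs[i], cs[i+1]] := by rw [hd1, hd2]; rfl
      have h2none : twoMassB.lookup (String.ofList [cs[i], cs[i+1]]) = none := by
        apply Option.not_isSome_iff_eq_none.mp
        intro hcon
        exact hc ⟨by omega, by rw [ht2, lookup_two]; exact hcon⟩
      rw [hd1, hd2, goB_skip2 _ _ _ _ h2none, h1none, Option.getD_none, add_zero, ← hd2]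
    · have hnil : cs.drop (i + 1) = [] := List.drop_eq_nil_of_le (by omega)
      rw [hnil, hd1, hnil, goB_single, h1none, Option.getD_none, add_zero]
  | case4 i acc h =>
    rw [List.drop_eq_nil_of_le (by omega), goB_nil]

-- ===== VERDICT (by name: the statement is the Claim_ definition above) =====
theorem get_mass_spec : Claim_equal_get_mass := by
  intro smi _
  unfold Spec_get_mass get_mass get_mass_alt
  simpa using loop_eq_go smi.toList 0 0
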